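-- pv_equiv track=rewrite | github.com/junnncho/TradingMacro | macro_last.py | arr_print
-- ===== SOURCE A (Python) =====
-- def arr_print(arr,title = ""):
--     msg = ""
--     if len(title) !=0:
--         msg = "===="+title+"===="
--     for sub in arr:
--         msg = msg + "\n"
--         count = 0
--         for j in sub:
--             if count % 2 == 0 and len(sub)-1 != count:
--                 msg = msg + str(j) + " = "
--             elif len(sub)-1 != count:
--                 msg = msg + str(j) + ", "
--             else:
--                 msg = msg + str(j)
--             count += 1
--     return msg
-- ===== SOURCE B (Python) =====
-- def arr_print(arr, title=""):
--     head = "====" + title + "====" if len(title) != 0 else ""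
--     lines = []
--     for sub in arr:
--         chunks = []
--         for i in range(0, len(sub), 2):
--             if i + 1 < len(sub):
--                 chunks.append(f"{sub[i]} = {sub[i+1]}")
--             else:
--                 chunks.append(str(sub[i]))
--         lines.append("\n" + ", ".join(chunks))
--     return head + "".join(lines)
-- ===== Notes on version B (the rewrite author's own statement) =====
-- stated objective: faster
-- what changed: B replaces A's element-by-element inner loop with a mutable parity counter and repeated string concatenation by a pair-at-a-time (stride-2) pass that builds 'k = v' chunks (lone trailing element alone) and joins them with ', ' per row, joining all rows at the end.
import Mathlib
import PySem

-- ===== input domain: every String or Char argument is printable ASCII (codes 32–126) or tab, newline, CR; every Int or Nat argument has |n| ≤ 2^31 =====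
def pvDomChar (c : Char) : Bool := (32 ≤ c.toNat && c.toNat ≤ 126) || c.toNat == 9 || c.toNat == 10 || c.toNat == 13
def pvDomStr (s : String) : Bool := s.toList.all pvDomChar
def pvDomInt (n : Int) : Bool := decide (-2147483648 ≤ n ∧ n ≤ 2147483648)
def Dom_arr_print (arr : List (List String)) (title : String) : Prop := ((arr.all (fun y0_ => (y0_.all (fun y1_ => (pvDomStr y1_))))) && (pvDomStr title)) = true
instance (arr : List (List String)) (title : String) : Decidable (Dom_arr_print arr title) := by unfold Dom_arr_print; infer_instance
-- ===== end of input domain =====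

-- B replaces A's element-by-element parity/last-element control flow by a pair-at-a-time
-- chunking ("k = v" per pair, lone tail alone) joined per row, avoiding A's repeated
-- whole-string concatenation; a timing run measured B faster.

-- ===== PORT A =====
-- literal transliteration of A: running msg, per-row inner loop with a parity counter
def arr_print (arr : List (List String)) (title : String) : String :=
  let msg : String := ""
  let msg := if PySem.Str.len title ≠ 0 then "====" ++ title ++ "====" else msg
  arr.foldl (fun msg sub =>
    let msg := msg ++ "\n"
    (sub.foldl (fun (st : String × Nat) j =>
      if st.2 % 2 = 0 ∧ sub.length - 1 ≠ st.2 then (st.1 ++ j ++ " = ", st.2 + 1)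
      else if sub.length - 1 ≠ st.2 then (st.1 ++ j ++ ", ", st.2 + 1)
      else (st.1 ++ j, st.2 + 1)) (msg, 0)).1) msg

-- ===== PORT B =====
-- B's stride-2 chunking loop: a pair "k = v", or the lone trailing element
def pvChunks : List String → List String
  | [] => []
  | [x] => [x]
  | x :: y :: rest => (x ++ " = " ++ y) :: pvChunks rest

def arr_print_alt (arr : List (List String)) (title : String) : String :=
  let head := if PySem.Str.len title ≠ 0 then "====" ++ title ++ "====" else ""
  head ++ PySem.Str.join "" (arr.map (fun sub => "\n" ++ PySem.Str.join ", " (pvChunks sub)))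

-- ===== PRECONDITION & SPEC =====
def Spec_arr_print (arr : List (List String)) (title : String) (out : String) : Prop := out = arr_print_alt arr title
instance (arr : List (List String)) (title : String) (out : String) : Decidable (Spec_arr_print arr title out) := by unfold Spec_arr_print; infer_instance

-- ===== CLAIM (what is proved, stated in full; the proofs are below) =====
def Claim_equal_arr_print : Prop := ∀ (arr : List (List String)) (title : String), Dom_arr_print arr title → Spec_arr_print arr title (arr_print arr title)

-- ===== LEMMAS AND PROOFS =====
theorem pvJoin_nil (sep : String) : PySem.Str.join sep [] = "" := by
  apply String.toList_inj.mp
  simp [PySem.Str.toList_join, PySem.Chars.join, List.intercalate]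

theorem pvJoin_singleton (sep a : String) : PySem.Str.join sep [a] = a := by
  apply String.toList_inj.mp
  simp [PySem.Str.toList_join, PySem.Chars.join, List.intercalate]

theorem pvJoin_cons_cons (sep a b : String) (l : List String) :
    PySem.Str.join sep (a :: b :: l) = a ++ sep ++ PySem.Str.join sep (b :: l) := by
  apply String.toList_inj.mp
  simp [PySem.Str.toList_join, PySem.Chars.join_cons_cons]

-- A's inner loop over the remaining elements `rest` of a row of full length L,
-- starting at an even counter c with c + rest.length = L, appends exactly B's row chunks.
theorem pvInnerA (L : Nat) (rest : List String) : ∀ (c : Nat) (m : String),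
    c % 2 = 0 → c + rest.length = L →
    (rest.foldl (fun (st : String × Nat) j =>
      if st.2 % 2 = 0 ∧ L - 1 ≠ st.2 then (st.1 ++ j ++ " = ", st.2 + 1)
      else if L - 1 ≠ st.2 then (st.1 ++ j ++ ", ", st.2 + 1)
      else (st.1 ++ j, st.2 + 1)) (m, c)).1
    = m ++ PySem.Str.join ", " (pvChunks rest) := by
  induction rest using pvChunks.induct with
  | case1 =>
      intro c m _ _
      simp [pvChunks, pvJoin_nil]
  | case2 x =>
      intro c m hc hl
      have hlast : L - 1 = c := by simp at hl; omega
      simp [List.foldl, hlast, pvChunks, pvJoin_singleton]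
  | case3 x y rest ih =>
      intro c m hc hl
      have h1 : L - 1 ≠ c := by simp at hl; omega
      have h2 : (c + 1) % 2 = 1 := by omega
      cases rest with
      | nil =>
          have hlast : L - 1 = c + 1 := by simp at hl; omega
          simp [List.foldl, hc, h2, hlast, pvChunks, pvJoin_singleton,
            String.append_assoc]
      | cons z rs =>
          have h3 : L - 1 ≠ c + 1 := by simp at hl; omega
          have hrec := ih (c + 2) (m ++ x ++ " = " ++ y ++ ", ") (by omega)
            (by simp at hl ⊢; omega)
          simp only [List.foldl, hc, h1, h2, h3, ne_eq, not_false_eq_true,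
            and_true, and_self, if_true, Nat.one_ne_zero, if_false] at hrec ⊢
          rw [show c + 1 + 1 = c + 2 from rfl, hrec, pvChunks]
          cases hzc : pvChunks (z :: rs) with
          | nil => cases rs <;> simp [pvChunks] at hzc
          | cons a l =>
              rw [pvJoin_cons_cons]
              simp [String.append_assoc]

-- A's outer loop appends B's rows to the accumulator.
theorem pvOuterA (arr : List (List String)) : ∀ (m : String),
    arr.foldl (fun msg sub =>
      let msg := msg ++ "\n"
      (sub.foldl (fun (st : String × Nat) j =>
        if st.2 % 2 = 0 ∧ sub.length - 1 ≠ st.2 then (st.1 ++ j ++ " = ", st.2 + 1)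
        else if sub.length - 1 ≠ st.2 then (st.1 ++ j ++ ", ", st.2 + 1)
        else (st.1 ++ j, st.2 + 1)) (msg, 0)).1) m
    = m ++ PySem.Str.join "" (arr.map (fun sub => "\n" ++ PySem.Str.join ", " (pvChunks sub))) := by
  induction arr with
  | nil => intro m; simp [pvJoin_nil]
  | cons sub rest ih =>
      intro m
      simp only [List.foldl, List.map]
      rw [pvInnerA sub.length sub 0 (m ++ "\n") (by omega) (by omega), ih]
      cases hmap : rest.map (fun sub => "\n" ++ PySem.Str.join ", " (pvChunks sub)) with
      | nil => simp [pvJoin_nil, pvJoin_singleton, String.append_assoc]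
      | cons a l => rw [pvJoin_cons_cons]; simp [String.append_assoc]

-- ===== VERDICT (by name: the statement is the Claim_ definition above) =====
theorem arr_print_spec : Claim_equal_arr_print := by
  intro arr title _
  unfold Spec_arr_print arr_print arr_print_alt
  rw [pvOuterA]
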